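-- pv_equiv track=rewrite | github.com/EnterOgawa/p-model | scripts/gw/gw_polarization_inconclusive_reduction_audit.py | _count_summary
-- ===== SOURCE A (Python) =====
-- from typing import Any, Dict, List, Optional, Sequence
--
-- def _status_bucket(status: str) -> str:
--     s = str(status or "")
--     # 条件分岐: `s.startswith("reject")` を満たす経路を評価する。
--     if s.startswith("reject"):
--         return "reject"
--
--     # 条件分岐: `s.startswith("watch")` を満たす経路を評価する。
--
--     if s.startswith("watch"):
--         return "watch"
--
--     # 条件分岐: `s.startswith("pass")` を満たす経路を評価する。
--
--     if s.startswith("pass"):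
--         return "pass"
--
--     # 条件分岐: `s.startswith("inconclusive")` を満たす経路を評価する。
--
--     if s.startswith("inconclusive"):
--         return "inconclusive"
--
--     return "other"
--
-- def _count_summary(rows: List[Dict[str, Any]]) -> Dict[str, int]:
--     status_counts = {"reject": 0, "watch": 0, "pass": 0, "inconclusive": 0, "other": 0}
--     for row in rows:
--         bucket = _status_bucket(str(row.get("status") or ""))
--         status_counts[bucket] = int(status_counts.get(bucket, 0)) + 1
--
--     decisive = int(status_counts["reject"] + status_counts["watch"] + status_counts["pass"])
--     return {
--         "n_rows": int(len(rows)),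
--         "n_decisive": decisive,
--         "n_inconclusive": int(status_counts["inconclusive"]),
--         "n_reject": int(status_counts["reject"]),
--         "n_watch": int(status_counts["watch"]),
--         "n_pass": int(status_counts["pass"]),
--         "n_other": int(status_counts["other"]),
--     }
-- ===== SOURCE B (Python) =====
-- from typing import Any, Dict, List
--
-- def _count_summary(rows: List[Dict[str, Any]]) -> Dict[str, int]:
--     n_reject = sum(1 for r in rows if str(r.get("status") or "").startswith("reject"))
--     n_watch = sum(1 for r in rows if str(r.get("status") or "").startswith("watch"))
--     n_pass = sum(1 for r in rows if str(r.get("status") or "").startswith("pass"))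
--     n_inconclusive = sum(1 for r in rows if str(r.get("status") or "").startswith("inconclusive"))
--     return {
--         "n_rows": len(rows),
--         "n_decisive": n_reject + n_watch + n_pass,
--         "n_inconclusive": n_inconclusive,
--         "n_reject": n_reject,
--         "n_watch": n_watch,
--         "n_pass": n_pass,
--         "n_other": len(rows) - (n_reject + n_watch + n_pass + n_inconclusive),
--     }
-- ===== Notes on version B (the rewrite author's own statement) =====
-- stated objective: idiomatic
-- what changed: Replaces the single bucketing loop over a mutable counts dict (with the _status_bucket helper) by four independent counting passes, one per status prefix, and derives n_other as the complement len(rows) - sum of the four counts; correct because the four prefixes are pairwise non-prefixing, so each row matches at most one.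
import Mathlib
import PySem

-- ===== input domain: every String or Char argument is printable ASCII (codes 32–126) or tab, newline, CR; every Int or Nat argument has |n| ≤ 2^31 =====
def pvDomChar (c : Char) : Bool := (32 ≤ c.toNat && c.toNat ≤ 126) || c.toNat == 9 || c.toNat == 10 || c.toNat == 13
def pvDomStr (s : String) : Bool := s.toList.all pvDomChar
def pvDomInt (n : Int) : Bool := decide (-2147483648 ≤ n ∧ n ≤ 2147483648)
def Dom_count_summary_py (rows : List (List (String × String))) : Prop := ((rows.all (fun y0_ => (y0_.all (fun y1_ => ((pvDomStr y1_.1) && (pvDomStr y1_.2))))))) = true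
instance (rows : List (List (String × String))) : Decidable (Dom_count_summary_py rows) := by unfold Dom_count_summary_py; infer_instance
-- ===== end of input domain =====

-- B replaces A's single bucketing loop over a mutable counts dict by four independent counting
-- passes (one per status prefix) and derives n_other by complement (objective: idiomatic).

-- ===== PORT A =====
-- str(status or "") on a String argument is the identity (an empty string stays empty)
def status_bucket_py (status : String) : String :=
  if PySem.Str.startswith status "reject" then "reject"
  else if PySem.Str.startswith status "watch" then "watch"
  else if PySem.Str.startswith status "pass" then "pass"
  else if PySem.Str.startswith status "inconclusive" then "inconclusive"
  else "other"

def count_summary_py (rows : List (List (String × String))) : List (String × Int) :=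
  let init : PySem.Dict String Int :=
    PySem.Dict.mk [("reject", 0), ("watch", 0), ("pass", 0), ("inconclusive", 0), ("other", 0)]
  let status_counts := rows.foldl (fun d row =>
    -- str(row.get("status") or ""): none → "", and "" (falsy) → "", so Option.getD "" is exact
    let bucket := status_bucket_py (((PySem.Dict.mk row).get? "status").getD "")
    d.insert bucket (d.getD bucket 0 + 1)) init
  let decisive : Int :=
    status_counts.getD "reject" 0 + status_counts.getD "watch" 0 + status_counts.getD "pass" 0
  [("n_rows", (rows.length : Int)),
   ("n_decisive", decisive),
   ("n_inconclusive", status_counts.getD "inconclusive" 0),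
   ("n_reject", status_counts.getD "reject" 0),
   ("n_watch", status_counts.getD "watch" 0),
   ("n_pass", status_counts.getD "pass" 0),
   ("n_other", status_counts.getD "other" 0)]

-- ===== PORT B =====
-- sum(1 for r in rows if str(r.get("status") or "").startswith(pre)) for one prefix
def pvCountPre (rows : List (List (String × String))) (pre : String) : Int :=
  (rows.countP (fun r =>
    PySem.Str.startswith (((PySem.Dict.mk r).get? "status").getD "") pre) : Int)

def count_summary_py_alt (rows : List (List (String × String))) : List (String × Int) :=
  let n_reject := pvCountPre rows "reject"
  let n_watch := pvCountPre rows "watch"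
  let n_pass := pvCountPre rows "pass"
  let n_inconclusive := pvCountPre rows "inconclusive"
  [("n_rows", (rows.length : Int)),
   ("n_decisive", n_reject + n_watch + n_pass),
   ("n_inconclusive", n_inconclusive),
   ("n_reject", n_reject),
   ("n_watch", n_watch),
   ("n_pass", n_pass),
   ("n_other", (rows.length : Int) - (n_reject + n_watch + n_pass + n_inconclusive))]

-- ===== PRECONDITION & SPEC =====
def Spec_count_summary_py (rows : List (List (String × String))) (out : List (String × Int)) : Prop := out = count_summary_py_alt rows
instance (rows : List (List (String × String))) (out : List (String × Int)) : Decidable (Spec_count_summary_py rows out) := by unfold Spec_count_summary_py; infer_instance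

-- ===== CLAIM (what is proved, stated in full; the proofs are below) =====
def Claim_equal_count_summary_py : Prop := ∀ (rows : List (List (String × String))), Dom_count_summary_py rows → Spec_count_summary_py rows (count_summary_py rows)

-- ===== LEMMAS AND PROOFS =====

-- the five-key counts dict A's loop maintains (proof-side abbreviation)
def pvD (a b c d e : Int) : PySem.Dict String Int :=
  PySem.Dict.mk [("reject", a), ("watch", b), ("pass", c), ("inconclusive", d), ("other", e)]

-- two distinct non-prefixing literals cannot both be prefixes of the same status string
theorem pv_excl {p q : String} (s : String)
    (hpq : ¬ p.toList <+: q.toList) (hqp : ¬ q.toList <+: p.toList)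
    (hp : PySem.Str.startswith s p = true) : PySem.Str.startswith s q = false := by
  cases hb : PySem.Str.startswith s q with
  | false => rfl
  | true =>
    rw [PySem.Str.startswith_eq, PySem.Chars.startswith_iff] at hp hb
    rcases List.prefix_or_prefix_of_prefix hp hb with h1 | h1
    · exact absurd h1 hpq
    · exact absurd h1 hqp

-- pvCountPre unfolded one row at a time
theorem pv_count_cons (r : List (String × String)) (rs : List (List (String × String)))
    (pre : String) : pvCountPre (r :: rs) pre =
    (if PySem.Str.startswith (((PySem.Dict.mk r).get? "status").getD "") pre then 1 else 0)
      + pvCountPre rs pre := by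
  simp only [pvCountPre, List.countP_cons]
  split_ifs <;> push_cast <;> omega

theorem pv_ins_reject (a b c d e : Int) :
    (pvD a b c d e).insert "reject" ((pvD a b c d e).getD "reject" 0 + 1) = pvD (a + 1) b c d e := by
  simp [pvD, PySem.Dict.insert, PySem.Dict.getD, PySem.Dict.get?, PySem.Dict.contains]

theorem pv_ins_watch (a b c d e : Int) :
    (pvD a b c d e).insert "watch" ((pvD a b c d e).getD "watch" 0 + 1) = pvD a (b + 1) c d e := by
  simp [pvD, PySem.Dict.insert, PySem.Dict.getD, PySem.Dict.get?, PySem.Dict.contains]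

theorem pv_ins_pass (a b c d e : Int) :
    (pvD a b c d e).insert "pass" ((pvD a b c d e).getD "pass" 0 + 1) = pvD a b (c + 1) d e := by
  simp [pvD, PySem.Dict.insert, PySem.Dict.getD, PySem.Dict.get?, PySem.Dict.contains]

theorem pv_ins_inconclusive (a b c d e : Int) :
    (pvD a b c d e).insert "inconclusive" ((pvD a b c d e).getD "inconclusive" 0 + 1)
      = pvD a b c (d + 1) e := by
  simp [pvD, PySem.Dict.insert, PySem.Dict.getD, PySem.Dict.get?, PySem.Dict.contains]

theorem pv_ins_other (a b c d e : Int) :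
    (pvD a b c d e).insert "other" ((pvD a b c d e).getD "other" 0 + 1) = pvD a b c d (e + 1) := by
  simp [pvD, PySem.Dict.insert, PySem.Dict.getD, PySem.Dict.get?, PySem.Dict.contains]

-- loop invariant for A's foldl: the counts dict keeps its literal five-key shape,
-- each decisive bucket advances by B's per-prefix count, and "other" by the complement
theorem pv_loop (rows : List (List (String × String))) (a b c d e : Int) :
    rows.foldl (fun d row =>
        let bucket := status_bucket_py (((PySem.Dict.mk row).get? "status").getD "")
        d.insert bucket (d.getD bucket 0 + 1))
      (PySem.Dict.mk [("reject", a), ("watch", b), ("pass", c), ("inconclusive", d), ("other", e)])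
    = pvD (a + pvCountPre rows "reject") (b + pvCountPre rows "watch")
        (c + pvCountPre rows "pass") (d + pvCountPre rows "inconclusive")
        (e + ((rows.length : Int) - (pvCountPre rows "reject" + pvCountPre rows "watch"
          + pvCountPre rows "pass" + pvCountPre rows "inconclusive"))) := by
  show _ = pvD _ _ _ _ _
  rw [show PySem.Dict.mk [("reject", a), ("watch", b), ("pass", c), ("inconclusive", d), ("other", e)] = pvD a b c d e from rfl]
  induction rows generalizing a b c d e with
  | nil => simp [pvCountPre]
  | cons r rs ih =>
    simp only [List.foldl_cons]
    by_cases h1 : PySem.Str.startswith (((PySem.Dict.mk r).get? "status").getD "") "reject" = true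
    · have h2 := pv_excl (q := "watch") _ (by decide) (by decide) h1
      have h3 := pv_excl (q := "pass") _ (by decide) (by decide) h1
      have h4 := pv_excl (q := "inconclusive") _ (by decide) (by decide) h1
      have hb : status_bucket_py (((PySem.Dict.mk r).get? "status").getD "") = "reject" := by
        simp only [status_bucket_py]; rw [h1]; simp
      simp only [hb, pv_ins_reject, ih]
      simp only [pv_count_cons, h1, h2, h3, h4]
      simp [pvD]
      omega
    · rw [Bool.not_eq_true] at h1
      by_cases h2 : PySem.Str.startswith (((PySem.Dict.mk r).get? "status").getD "") "watch" = true
      · have h3 := pv_excl (q := "pass") _ (by decide) (by decide) h2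
        have h4 := pv_excl (q := "inconclusive") _ (by decide) (by decide) h2
        have hb : status_bucket_py (((PySem.Dict.mk r).get? "status").getD "") = "watch" := by
          simp only [status_bucket_py]; rw [h1, h2]; simp
        simp only [hb, pv_ins_watch, ih]
        simp only [pv_count_cons, h1, h2, h3, h4]
        simp [pvD]
        omega
      · rw [Bool.not_eq_true] at h2
        by_cases h3 : PySem.Str.startswith (((PySem.Dict.mk r).get? "status").getD "") "pass" = true
        · have h4 := pv_excl (q := "inconclusive") _ (by decide) (by decide) h3
          have hb : status_bucket_py (((PySem.Dict.mk r).get? "status").getD "") = "pass" := by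
            simp only [status_bucket_py]; rw [h1, h2, h3]; simp
          simp only [hb, pv_ins_pass, ih]
          simp only [pv_count_cons, h1, h2, h3, h4]
          simp [pvD]
          omega
        · rw [Bool.not_eq_true] at h3
          by_cases h4 : PySem.Str.startswith (((PySem.Dict.mk r).get? "status").getD "") "inconclusive" = true
          · have hb : status_bucket_py (((PySem.Dict.mk r).get? "status").getD "") = "inconclusive" := by
              simp only [status_bucket_py]; rw [h1, h2, h3, h4]; simp
            simp only [hb, pv_ins_inconclusive, ih]
            simp only [pv_count_cons, h1, h2, h3, h4]
            simp [pvD]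
            omega
          · rw [Bool.not_eq_true] at h4
            have hb : status_bucket_py (((PySem.Dict.mk r).get? "status").getD "") = "other" := by
              simp only [status_bucket_py]; rw [h1, h2, h3, h4]; simp
            simp only [hb, pv_ins_other, ih]
            simp only [pv_count_cons, h1, h2, h3, h4]
            simp [pvD]
            omega

-- ===== VERDICT (by name: the statement is the Claim_ definition above) =====
theorem count_summary_py_spec : Claim_equal_count_summary_py := by
  intro rows _
  show count_summary_py rows = count_summary_py_alt rows
  simp only [count_summary_py, count_summary_py_alt]
  rw [pv_loop]
  simp [pvD, PySem.Dict.getD, PySem.Dict.get?]
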